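-- pv_equiv track=rewrite | github.com/mupputur/Windows | chary/assignment_2/8_occurances_vowels.py | occurrences_of_vowels
-- ===== SOURCE A (Python) =====
-- def occurrences_of_vowels(y):
--     vowels="AEIOU"
--     count_vowels={}
--
--     for j in y:
--         if j in vowels and j not in count_vowels :
--             count_vowels[j]=1
--         elif j in vowels and j in count_vowels :
--             count_vowels[j]=count_vowels[j]+1
--     return count_vowels
-- ===== SOURCE B (Python) =====
-- def occurrences_of_vowels(y):
--     seen = []
--     for j in y:
--         if j in "AEIOU" and j not in seen:
--             seen.append(j)
--     return {v: sum(1 for j in y if j == v) for v in seen}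
-- ===== Notes on version B (the rewrite author's own statement) =====
-- stated objective: alternative
-- what changed: Replaces A's single-pass incremental dict counting (insert-1 / read-and-rewrite per character) by a two-phase scheme: one pass collecting the distinct vowels in first-occurrence order, then one str.count scan per present vowel to build the result dict.
import Mathlib
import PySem

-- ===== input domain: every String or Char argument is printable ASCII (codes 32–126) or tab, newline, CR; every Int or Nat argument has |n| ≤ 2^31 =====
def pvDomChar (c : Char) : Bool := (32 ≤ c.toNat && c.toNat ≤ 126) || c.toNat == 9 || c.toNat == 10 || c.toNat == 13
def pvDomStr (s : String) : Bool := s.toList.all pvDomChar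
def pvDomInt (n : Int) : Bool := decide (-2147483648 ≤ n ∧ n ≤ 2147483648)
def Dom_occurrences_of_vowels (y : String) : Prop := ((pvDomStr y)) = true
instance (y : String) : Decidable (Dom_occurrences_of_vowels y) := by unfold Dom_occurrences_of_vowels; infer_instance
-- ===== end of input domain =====

-- B replaces A's single-pass incremental dict counting by a two-phase scheme (collect distinct
-- vowels in first-occurrence order, then count each present vowel by its own scan); objective: alternative.

-- ===== PORT A =====
-- the constant string "AEIOU"
def pvVowels : List Char := "AEIOU".toList

-- one iteration of A's loop body: the if/elif chain on character j over the running dict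
-- ('j in vowels' is PySem.Chars.isIn on the one-character string [j]; 'count_vowels[j]' in the
-- elif branch is read with getD, exact there because the branch guarantees the key is present)
def pvStepA (d : PySem.Dict String Int) (j : Char) : PySem.Dict String Int :=
  if PySem.Chars.isIn [j] pvVowels && !(d.contains (String.ofList [j])) then
    d.insert (String.ofList [j]) 1
  else if PySem.Chars.isIn [j] pvVowels && d.contains (String.ofList [j]) then
    d.insert (String.ofList [j]) (d.getD (String.ofList [j]) 0 + 1)
  else d

def occurrences_of_vowels (y : String) : List (String × Int) :=
  (y.toList.foldl pvStepA PySem.Dict.empty).items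

-- ===== PORT B =====
-- one iteration of B's first loop: append j to seen if it is an unseen vowel
def pvStepSeen (s : List Char) (j : Char) : List Char :=
  if PySem.Chars.isIn [j] pvVowels && !(s.contains j) then s ++ [j] else s

-- phase 1: distinct vowels in first-occurrence order; phase 2: one counting scan per vowel
def occurrences_of_vowels_alt (y : String) : List (String × Int) :=
  (y.toList.foldl pvStepSeen []).map
    (fun v => (String.ofList [v], y.toList.foldl (fun n j => if j == v then n + 1 else n) (0 : Int)))

-- ===== PRECONDITION & SPEC =====
def Spec_occurrences_of_vowels (y : String) (out : List (String × Int)) : Prop := out = occurrences_of_vowels_alt y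
instance (y : String) (out : List (String × Int)) : Decidable (Spec_occurrences_of_vowels y out) := by unfold Spec_occurrences_of_vowels; infer_instance

-- ===== CLAIM (what is proved, stated in full; the proofs are below) =====
def Claim_equal_occurrences_of_vowels : Prop := ∀ (y : String), Dom_occurrences_of_vowels y → Spec_occurrences_of_vowels y (occurrences_of_vowels y)

-- ===== LEMMAS AND PROOFS =====

theorem pvInj : Function.Injective (fun c : Char => String.ofList [c]) := by
  intro a b h
  have := congrArg String.toList h
  simp at this
  exact this

theorem pvKeys (s : List Char) (f : Char → Int) :
    (PySem.Dict.mk (s.map (fun v => (String.ofList [v], f v)))).keys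
      = s.map (fun v => String.ofList [v]) := by
  simp [PySem.Dict.keys, List.map_map, Function.comp]

theorem pvContains (s : List Char) (f : Char → Int) (j : Char) :
    (PySem.Dict.mk (s.map (fun v => (String.ofList [v], f v)))).contains (String.ofList [j])
      = decide (j ∈ s) := by
  rw [PySem.Dict.contains_eq_decide_mem_keys, pvKeys]
  have hmem : (String.ofList [j] ∈ s.map (fun v => String.ofList [v])) ↔ j ∈ s := by
    constructor
    · intro h
      rcases List.mem_map.mp h with ⟨v, hv, heq⟩
      exact (pvInj heq) ▸ hv
    · intro h
      exact List.mem_map.mpr ⟨j, h, rfl⟩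
  by_cases h : j ∈ s <;> simp [hmem, h]

theorem pvGetD (s : List Char) (f : Char → Int) (j : Char) (hnd : s.Nodup) (hm : j ∈ s) :
    (PySem.Dict.mk (s.map (fun v => (String.ofList [v], f v)))).getD (String.ofList [j]) 0 = f j := by
  apply PySem.Dict.getD_of_mem_items
  · exact List.mem_map.mpr ⟨j, hm, rfl⟩
  · rw [pvKeys]
    exact hnd.map pvInj

theorem pvSeenMem : ∀ (cs s : List Char) (v : Char), v ∈ cs.foldl pvStepSeen s →
    v ∈ s ∨ PySem.Chars.isIn [v] pvVowels = true := by
  intro cs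
  induction cs with
  | nil =>
    intro s v h
    simp only [List.foldl_nil] at h
    exact Or.inl h
  | cons j cs ih =>
    intro s v h
    simp only [List.foldl_cons] at h
    rcases ih _ v h with h' | h'
    · unfold pvStepSeen at h'
      split_ifs at h' with hg
      · rcases List.mem_append.mp h' with h2 | h2
        · exact Or.inl h2
        · simp at h2
          subst h2
          exact Or.inr (Bool.and_elim_left hg)
      · exact Or.inl h'
    · exact Or.inr h'

theorem pvMain : ∀ (cs s : List Char) (f : Char → Int), s.Nodup →
    (∀ v ∈ s, PySem.Chars.isIn [v] pvVowels = true) →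
    (cs.foldl pvStepA (PySem.Dict.mk (s.map (fun v => (String.ofList [v], f v))))).items
      = (cs.foldl pvStepSeen s).map
          (fun v => (String.ofList [v], (if v ∈ s then f v else 0) + (cs.count v : Int))) := by
  intro cs
  induction cs with
  | nil =>
    intro s f hnd hvow
    simp only [List.foldl_nil, List.count_nil, Nat.cast_zero, add_zero]
    exact (List.map_congr_left (fun v hv => by simp [hv])).symm
  | cons j cs ih =>
    intro s f hnd hvow
    simp only [List.foldl_cons]
    by_cases hv : PySem.Chars.isIn [j] pvVowels = true
    · by_cases hm : j ∈ s
      · -- vowel already in the dict / seen list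
        have hc : (PySem.Dict.mk (s.map (fun v => (String.ofList [v], f v)))).contains (String.ofList [j]) = true := by
          rw [pvContains]; simp [hm]
        have hstep : pvStepA (PySem.Dict.mk (s.map (fun v => (String.ofList [v], f v)))) j
            = PySem.Dict.mk (s.map (fun v => (String.ofList [v], if v = j then f j + 1 else f v))) := by
          unfold pvStepA
          rw [hv, hc, pvGetD s f j hnd hm]
          simp only [Bool.not_true, Bool.and_false, Bool.and_true, if_false, if_true,
            Bool.false_eq_true]
          apply PySem.Dict.ext
          rw [PySem.Dict.items_insert_of_contains _ _ hc, List.map_map]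
          apply List.map_congr_left
          intro v _
          by_cases hvj : v = j
          · subst hvj; simp
          · have h1 : ¬((String.ofList [v] == String.ofList [j]) = true) := by
              simp only [beq_iff_eq]
              exact fun h => hvj (pvInj h)
            simp only [Function.comp_apply]
            rw [if_neg h1, if_neg hvj]
        have hseen : pvStepSeen s j = s := by
          unfold pvStepSeen; simp [hm]
        rw [hstep, hseen, ih s (fun v => if v = j then f j + 1 else f v) hnd hvow]
        apply List.map_congr_left
        intro v _
        by_cases hvj : v = j
        · subst hvj
          simp only [hm, if_true, List.count_cons, beq_self_eq_true]
          push_cast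
          ring
        · simp [hvj, Ne.symm hvj]
      · -- vowel seen for the first time
        have hc : (PySem.Dict.mk (s.map (fun v => (String.ofList [v], f v)))).contains (String.ofList [j]) = false := by
          rw [pvContains]; simp [hm]
        have hstep : pvStepA (PySem.Dict.mk (s.map (fun v => (String.ofList [v], f v)))) j
            = PySem.Dict.mk ((s ++ [j]).map (fun v => (String.ofList [v], if v = j then 1 else f v))) := by
          unfold pvStepA
          rw [hv, hc]
          simp only [Bool.not_false, Bool.and_true, if_true]
          apply PySem.Dict.ext
          rw [PySem.Dict.items_insert_of_not_contains _ _ hc, List.map_append]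
          congr 1
          · apply List.map_congr_left
            intro v hvm
            have : v ≠ j := fun h => hm (h ▸ hvm)
            simp [this]
          · simp
        have hseen : pvStepSeen s j = s ++ [j] := by
          unfold pvStepSeen
          simp [hv, hm]
        have hnd' : (s ++ [j]).Nodup := by
          rw [List.nodup_append]
          refine ⟨hnd, List.nodup_singleton j, ?_⟩
          intro a ha b hb
          have hb' : b = j := by simpa using hb
          subst hb'
          exact fun h => hm (h ▸ ha)
        have hvow' : ∀ v ∈ s ++ [j], PySem.Chars.isIn [v] pvVowels = true := by
          intro v hvm
          rcases List.mem_append.mp hvm with h | h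
          · exact hvow v h
          · simp at h; subst h; exact hv
        rw [hstep, hseen, ih (s ++ [j]) (fun v => if v = j then 1 else f v) hnd' hvow']
        apply List.map_congr_left
        intro v _
        by_cases hvj : v = j
        · subst hvj
          simp only [List.mem_append, List.mem_singleton, or_true, if_true, hm, if_false,
            List.count_cons, beq_self_eq_true]
          push_cast
          ring
        · have hms : v ∈ s ++ [j] ↔ v ∈ s := by simp [List.mem_append, hvj]
          simp [hms, hvj, Ne.symm hvj]
    · -- not a vowel: nothing changes on either side
      have hv' : PySem.Chars.isIn [j] pvVowels = false := by
        simpa using hv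
      have hstep : pvStepA (PySem.Dict.mk (s.map (fun v => (String.ofList [v], f v)))) j
          = PySem.Dict.mk (s.map (fun v => (String.ofList [v], f v))) := by
        unfold pvStepA; simp [hv']
      have hseen : pvStepSeen s j = s := by
        unfold pvStepSeen; simp [hv']
      rw [hstep, hseen, ih s f hnd hvow]
      apply List.map_congr_left
      intro v hvm
      have hne : v ≠ j := by
        intro h
        subst h
        rcases pvSeenMem cs s v hvm with h' | h'
        · rw [hvow v h'] at hv'; cases hv'
        · rw [h'] at hv'; cases hv'
      simp [Ne.symm hne]

-- ===== VERDICT (by name: the statement is the Claim_ definition above) =====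
theorem occurrences_of_vowels_spec : Claim_equal_occurrences_of_vowels := by
  unfold Claim_equal_occurrences_of_vowels Spec_occurrences_of_vowels
  intro y _
  unfold occurrences_of_vowels occurrences_of_vowels_alt
  have h := pvMain y.toList [] (fun _ => 0) (by simp) (by simp)
  simp only [List.map_nil] at h
  rw [show PySem.Dict.empty = PySem.Dict.mk ([] : List (String × Int)) from rfl, h]
  apply List.map_congr_left
  intro v _
  rw [PySem.List.foldl_count_if (fun j => j == v) y.toList 0]
  simp [List.count]
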